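-- pv_equiv track=rewrite | github.com/chrischizinski/wildlife-grad | scripts/comprehensive_dashboard_generator.py | _categorize_organizations
-- ===== SOURCE A (Python) =====
-- from typing import Dict, List, Set
--
-- def _categorize_organizations(org_stats: Dict) -> Dict:
--     """Categorize organizations by type"""
--     categories = {
--         "State Universities": 0,
--         "Federal Agencies": 0,
--         "Private Organizations": 0,
--         "Non-Profit Organizations": 0,
--         "Other": 0
--     }
--
--     for org, count in org_stats.items():
--         org_lower = org.lower()
--
--         if "(state)" in org_lower or "university" in org_lower or "college" in org_lower:
--             categories["State Universities"] += count
--         elif "(federal)" in org_lower or "usgs" in org_lower or "forest service" in org_lower: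
--             categories["Federal Agencies"] += count
--         elif "(private)" in org_lower or "company" in org_lower or "corporation" in org_lower:
--             categories["Private Organizations"] += count
--         elif "foundation" in org_lower or "society" in org_lower or "trust" in org_lower:
--             categories["Non-Profit Organizations"] += count
--         else:
--             categories["Other"] += count
--
--     return categories
-- ===== SOURCE B (Python) =====
-- CATEGORY_NAMES = [
--     "State Universities",
--     "Federal Agencies",
--     "Private Organizations",
--     "Non-Profit Organizations",
--     "Other",
-- ]
--
-- KEYWORD_GROUPS = [
--     ["(state)", "university", "college"],
--     ["(federal)", "usgs", "forest service"],
--     ["(private)", "company", "corporation"],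
--     ["foundation", "society", "trust"],
-- ]
--
--
-- def _index(org):
--     """Index of the first keyword group matching org (4 = Other)."""
--     low = org.lower()
--     return next((i for i, kws in enumerate(KEYWORD_GROUPS) if any(k in low for k in kws)), 4)
--
--
-- def _categorize_organizations(org_stats):
--     """Categorize organizations by type: map each org to a category index,
--     then build the result as one per-category filtered sum (no mutable tallying)."""
--     indexed = [(_index(org), count) for org, count in org_stats.items()]
--     return {name: sum(c for i, c in indexed if i == j)
--             for j, name in enumerate(CATEGORY_NAMES)}
-- ===== Notes on version B (the rewrite author's own statement) =====
-- stated objective: alternative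
-- what changed: Replaces A's single tallying pass (if/elif cascade incrementing a mutable dict) with two staged passes: first map every org to the index of its first matching keyword group, then build the output directly as five per-category filtered sums with no mutable tallying.
import Mathlib
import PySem

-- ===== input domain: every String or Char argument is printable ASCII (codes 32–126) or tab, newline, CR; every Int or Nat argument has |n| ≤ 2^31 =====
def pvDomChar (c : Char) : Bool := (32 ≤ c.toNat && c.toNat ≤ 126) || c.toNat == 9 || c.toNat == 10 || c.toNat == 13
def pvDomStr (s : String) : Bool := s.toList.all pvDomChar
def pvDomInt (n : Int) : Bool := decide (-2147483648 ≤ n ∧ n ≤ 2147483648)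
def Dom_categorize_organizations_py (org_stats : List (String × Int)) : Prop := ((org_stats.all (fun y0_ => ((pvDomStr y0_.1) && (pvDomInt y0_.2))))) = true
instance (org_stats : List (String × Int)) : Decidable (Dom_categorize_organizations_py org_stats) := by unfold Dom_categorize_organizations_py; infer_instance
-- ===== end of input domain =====

-- B replaces A's single tallying pass with an if/elif cascade into a dict by two staged passes:
-- map each org to a category index, then build the output as five filtered sums (objective: alternative).


-- ===== PORT A =====
-- one loop iteration of A's if/elif cascade; `categories[k] += count` is modify with
-- default 0 (exact here: every branch key is present in the dict from initialization)
def catA_step (d : PySem.Dict String Int) (p : String × Int) : PySem.Dict String Int :=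
  let org_lower := PySem.Str.lower p.1
  if PySem.Str.isIn "(state)" org_lower || PySem.Str.isIn "university" org_lower || PySem.Str.isIn "college" org_lower then
    d.modify "State Universities" 0 (· + p.2)
  else if PySem.Str.isIn "(federal)" org_lower || PySem.Str.isIn "usgs" org_lower || PySem.Str.isIn "forest service" org_lower then
    d.modify "Federal Agencies" 0 (· + p.2)
  else if PySem.Str.isIn "(private)" org_lower || PySem.Str.isIn "company" org_lower || PySem.Str.isIn "corporation" org_lower then
    d.modify "Private Organizations" 0 (· + p.2)
  else if PySem.Str.isIn "foundation" org_lower || PySem.Str.isIn "society" org_lower || PySem.Str.isIn "trust" org_lower then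
    d.modify "Non-Profit Organizations" 0 (· + p.2)
  else
    d.modify "Other" 0 (· + p.2)

def categorize_organizations_py (org_stats : List (String × Int)) : List (String × Int) :=
  let categories := (((((PySem.Dict.empty.insert "State Universities" (0 : Int)).insert "Federal Agencies" 0).insert "Private Organizations" 0).insert "Non-Profit Organizations" 0).insert "Other" 0)
  (org_stats.foldl catA_step categories).items

-- ===== PORT B =====
def pvCategoryNames : List String :=
  ["State Universities", "Federal Agencies", "Private Organizations", "Non-Profit Organizations", "Other"]

def pvKeywordGroups : List (List String) :=
  [["(state)", "university", "college"],
   ["(federal)", "usgs", "forest service"],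
   ["(private)", "company", "corporation"],
   ["foundation", "society", "trust"]]

-- `next((i for i, kws in enumerate(KEYWORD_GROUPS) if any(k in low for k in kws)), 4)`
def pvIndexScan : List (Int × List String) → String → Int
  | [], _ => 4
  | (i, kws) :: rest, low => if kws.any (fun k => PySem.Str.isIn k low) then i else pvIndexScan rest low

-- Source B's `_index`: index of the first matching keyword group, 4 = Other
def pvIndex (org : String) : Int :=
  pvIndexScan (PySem.List.enumerate pvKeywordGroups) (PySem.Str.lower org)

def categorize_organizations_py_alt (org_stats : List (String × Int)) : List (String × Int) :=
  let indexed := org_stats.map (fun p => (pvIndex p.1, p.2))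
  (PySem.List.enumerate pvCategoryNames).map (fun q =>
    (q.2, ((indexed.filter (fun r => r.1 == q.1)).map (·.2)).sum))

-- ===== PRECONDITION & SPEC =====
def Spec_categorize_organizations_py (org_stats : List (String × Int)) (out : List (String × Int)) : Prop := out = categorize_organizations_py_alt org_stats
instance (org_stats : List (String × Int)) (out : List (String × Int)) : Decidable (Spec_categorize_organizations_py org_stats out) := by unfold Spec_categorize_organizations_py; infer_instance

-- ===== CLAIM (what is proved, stated in full; the proofs are below) =====
def Claim_equal_categorize_organizations_py : Prop := ∀ (org_stats : List (String × Int)), Dom_categorize_organizations_py org_stats → Spec_categorize_organizations_py org_stats (categorize_organizations_py org_stats)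

-- ===== LEMMAS AND PROOFS =====
-- the per-category filtered sum B computes
def pvS (j : Int) (xs : List (String × Int)) : Int :=
  (((xs.map (fun p => (pvIndex p.1, p.2))).filter (fun r => r.1 == j)).map (·.2)).sum

-- A's initial dict, with the five running tallies abstracted
def pvMkD (a b c d e : Int) : PySem.Dict String Int :=
  (((((PySem.Dict.empty.insert "State Universities" a).insert "Federal Agencies" b).insert "Private Organizations" c).insert "Non-Profit Organizations" d).insert "Other" e)

lemma pvS_nil (j : Int) : pvS j [] = 0 := rfl

lemma pvS_cons (j : Int) (x : String × Int) (xs : List (String × Int)) :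
    pvS j (x :: xs) = (if pvIndex x.1 == j then x.2 else 0) + pvS j xs := by
  simp only [pvS, List.map_cons, List.filter_cons]
  split_ifs <;> simp

-- A's tallying loop, characterized by B's filtered sums
lemma foldl_catA (xs : List (String × Int)) :
    ∀ a b c d e : Int,
      (xs.foldl catA_step (pvMkD a b c d e)).items =
        [("State Universities", a + pvS 0 xs), ("Federal Agencies", b + pvS 1 xs),
         ("Private Organizations", c + pvS 2 xs), ("Non-Profit Organizations", d + pvS 3 xs),
         ("Other", e + pvS 4 xs)] := by
  induction xs with
  | nil =>
    intro a b c d e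
    simp only [List.foldl_nil, pvS_nil, add_zero]
    rfl
  | cons x xs ih =>
    intro a b c d e
    have hstep : ∀ j : Int, pvS j (x :: xs) = (if pvIndex x.1 == j then x.2 else 0) + pvS j xs :=
      fun j => pvS_cons j x xs
    simp only [List.foldl_cons]
    by_cases h0 : (PySem.Str.isIn "(state)" (PySem.Str.lower x.1) || PySem.Str.isIn "university" (PySem.Str.lower x.1) || PySem.Str.isIn "college" (PySem.Str.lower x.1)) = true
    case pos =>
      have h0r : (PySem.Str.isIn "(state)" (PySem.Str.lower x.1) || (PySem.Str.isIn "university" (PySem.Str.lower x.1) || PySem.Str.isIn "college" (PySem.Str.lower x.1))) = true := by rw [← Bool.or_assoc]; exact h0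
      have hA : catA_step (pvMkD a b c d e) x = pvMkD (a + x.2) b c d e := by
        simp only [catA_step]
        rw [if_pos h0]
        rfl
      have hi : pvIndex x.1 = 0 := by
        simp only [pvIndex, pvKeywordGroups, PySem.List.enumerate_cons, PySem.List.enumerate_nil,
          pvIndexScan, List.any_cons, List.any_nil, Bool.or_false]
        rw [h0r]
        rfl
      rw [hA, ih]
      simp [hstep, hi]; omega
    case neg =>
      by_cases h1 : (PySem.Str.isIn "(federal)" (PySem.Str.lower x.1) || PySem.Str.isIn "usgs" (PySem.Str.lower x.1) || PySem.Str.isIn "forest service" (PySem.Str.lower x.1)) = true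
      case pos =>
        have h0f : (PySem.Str.isIn "(state)" (PySem.Str.lower x.1) || (PySem.Str.isIn "university" (PySem.Str.lower x.1) || PySem.Str.isIn "college" (PySem.Str.lower x.1))) = false := by rw [← Bool.or_assoc]; exact eq_false_of_ne_true h0
        have h1r : (PySem.Str.isIn "(federal)" (PySem.Str.lower x.1) || (PySem.Str.isIn "usgs" (PySem.Str.lower x.1) || PySem.Str.isIn "forest service" (PySem.Str.lower x.1))) = true := by rw [← Bool.or_assoc]; exact h1
        have hA : catA_step (pvMkD a b c d e) x = pvMkD a (b + x.2) c d e := by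
          simp only [catA_step]
          rw [if_neg h0, if_pos h1]
          rfl
        have hi : pvIndex x.1 = 1 := by
          simp only [pvIndex, pvKeywordGroups, PySem.List.enumerate_cons, PySem.List.enumerate_nil,
            pvIndexScan, List.any_cons, List.any_nil, Bool.or_false]
          rw [h0f, h1r]
          rfl
        rw [hA, ih]
        simp [hstep, hi]; omega
      case neg =>
        by_cases h2 : (PySem.Str.isIn "(private)" (PySem.Str.lower x.1) || PySem.Str.isIn "company" (PySem.Str.lower x.1) || PySem.Str.isIn "corporation" (PySem.Str.lower x.1)) = true
        case pos =>
          have h0f : (PySem.Str.isIn "(state)" (PySem.Str.lower x.1) || (PySem.Str.isIn "university" (PySem.Str.lower x.1) || PySem.Str.isIn "college" (PySem.Str.lower x.1))) = false := by rw [← Bool.or_assoc]; exact eq_false_of_ne_true h0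
          have h1f : (PySem.Str.isIn "(federal)" (PySem.Str.lower x.1) || (PySem.Str.isIn "usgs" (PySem.Str.lower x.1) || PySem.Str.isIn "forest service" (PySem.Str.lower x.1))) = false := by rw [← Bool.or_assoc]; exact eq_false_of_ne_true h1
          have h2r : (PySem.Str.isIn "(private)" (PySem.Str.lower x.1) || (PySem.Str.isIn "company" (PySem.Str.lower x.1) || PySem.Str.isIn "corporation" (PySem.Str.lower x.1))) = true := by rw [← Bool.or_assoc]; exact h2
          have hA : catA_step (pvMkD a b c d e) x = pvMkD a b (c + x.2) d e := by
            simp only [catA_step]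
            rw [if_neg h0, if_neg h1, if_pos h2]
            rfl
          have hi : pvIndex x.1 = 2 := by
            simp only [pvIndex, pvKeywordGroups, PySem.List.enumerate_cons, PySem.List.enumerate_nil,
              pvIndexScan, List.any_cons, List.any_nil, Bool.or_false]
            rw [h0f, h1f, h2r]
            rfl
          rw [hA, ih]
          simp [hstep, hi]; omega
        case neg =>
          by_cases h3 : (PySem.Str.isIn "foundation" (PySem.Str.lower x.1) || PySem.Str.isIn "society" (PySem.Str.lower x.1) || PySem.Str.isIn "trust" (PySem.Str.lower x.1)) = true
          case pos =>
            have h0f : (PySem.Str.isIn "(state)" (PySem.Str.lower x.1) || (PySem.Str.isIn "university" (PySem.Str.lower x.1) || PySem.Str.isIn "college" (PySem.Str.lower x.1))) = false := by rw [← Bool.or_assoc]; exact eq_false_of_ne_true h0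
            have h1f : (PySem.Str.isIn "(federal)" (PySem.Str.lower x.1) || (PySem.Str.isIn "usgs" (PySem.Str.lower x.1) || PySem.Str.isIn "forest service" (PySem.Str.lower x.1))) = false := by rw [← Bool.or_assoc]; exact eq_false_of_ne_true h1
            have h2f : (PySem.Str.isIn "(private)" (PySem.Str.lower x.1) || (PySem.Str.isIn "company" (PySem.Str.lower x.1) || PySem.Str.isIn "corporation" (PySem.Str.lower x.1))) = false := by rw [← Bool.or_assoc]; exact eq_false_of_ne_true h2
            have h3r : (PySem.Str.isIn "foundation" (PySem.Str.lower x.1) || (PySem.Str.isIn "society" (PySem.Str.lower x.1) || PySem.Str.isIn "trust" (PySem.Str.lower x.1))) = true := by rw [← Bool.or_assoc]; exact h3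
            have hA : catA_step (pvMkD a b c d e) x = pvMkD a b c (d + x.2) e := by
              simp only [catA_step]
              rw [if_neg h0, if_neg h1, if_neg h2, if_pos h3]
              rfl
            have hi : pvIndex x.1 = 3 := by
              simp only [pvIndex, pvKeywordGroups, PySem.List.enumerate_cons, PySem.List.enumerate_nil,
                pvIndexScan, List.any_cons, List.any_nil, Bool.or_false]
              rw [h0f, h1f, h2f, h3r]
              rfl
            rw [hA, ih]
            simp [hstep, hi]; omega
          case neg =>
            have h0f : (PySem.Str.isIn "(state)" (PySem.Str.lower x.1) || (PySem.Str.isIn "university" (PySem.Str.lower x.1) || PySem.Str.isIn "college" (PySem.Str.lower x.1))) = false := by rw [← Bool.or_assoc]; exact eq_false_of_ne_true h0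
            have h1f : (PySem.Str.isIn "(federal)" (PySem.Str.lower x.1) || (PySem.Str.isIn "usgs" (PySem.Str.lower x.1) || PySem.Str.isIn "forest service" (PySem.Str.lower x.1))) = false := by rw [← Bool.or_assoc]; exact eq_false_of_ne_true h1
            have h2f : (PySem.Str.isIn "(private)" (PySem.Str.lower x.1) || (PySem.Str.isIn "company" (PySem.Str.lower x.1) || PySem.Str.isIn "corporation" (PySem.Str.lower x.1))) = false := by rw [← Bool.or_assoc]; exact eq_false_of_ne_true h2
            have h3f : (PySem.Str.isIn "foundation" (PySem.Str.lower x.1) || (PySem.Str.isIn "society" (PySem.Str.lower x.1) || PySem.Str.isIn "trust" (PySem.Str.lower x.1))) = false := by rw [← Bool.or_assoc]; exact eq_false_of_ne_true h3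
            have hA : catA_step (pvMkD a b c d e) x = pvMkD a b c d (e + x.2) := by
              simp only [catA_step]
              rw [if_neg h0, if_neg h1, if_neg h2, if_neg h3]
              rfl
            have hi : pvIndex x.1 = 4 := by
              simp only [pvIndex, pvKeywordGroups, PySem.List.enumerate_cons, PySem.List.enumerate_nil,
                pvIndexScan, List.any_cons, List.any_nil, Bool.or_false]
              rw [h0f, h1f, h2f, h3f]
              rfl
            rw [hA, ih]
            simp [hstep, hi]; omega

-- B's output, spelled out as the five filtered sums
lemma alt_eq (xs : List (String × Int)) :
    categorize_organizations_py_alt xs =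
      [("State Universities", pvS 0 xs), ("Federal Agencies", pvS 1 xs),
       ("Private Organizations", pvS 2 xs), ("Non-Profit Organizations", pvS 3 xs),
       ("Other", pvS 4 xs)] := by
  simp [categorize_organizations_py_alt, pvCategoryNames, PySem.List.enumerate, pvS]

-- ===== VERDICT (by name: the statement is the Claim_ definition above) =====
theorem categorize_organizations_py_spec : Claim_equal_categorize_organizations_py := by
  intro org_stats _
  unfold Spec_categorize_organizations_py
  show categorize_organizations_py org_stats = _
  unfold categorize_organizations_py
  rw [show (((((PySem.Dict.empty.insert "State Universities" (0 : Int)).insert "Federal Agencies" 0).insert "Private Organizations" 0).insert "Non-Profit Organizations" 0).insert "Other" 0) = pvMkD 0 0 0 0 0 from rfl]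
  rw [foldl_catA, alt_eq]
  simp
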